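-- pv_equiv track=rewrite | github.com/spe301/Sales-Scientist | helpers.py | triggerWords
-- ===== SOURCE A (Python) =====
-- def triggerWords(landingPage):
--     triggerWords = ['book', 'call', 'today', 'get', 'my', 'free', 'copy', 'checklist',
--             'pdf', 'report', 'ebook', 'join', 'session', 'now', 'set', 'email',
--             'free', 'list', 'attend', 'start', 'access', 'training', 'speak',
--             'expert', 'here', 'send', 'strategy', 'course', 'quote', 'newsletter']
--     tw = 0
--     for lp in landingPage.split(' '):
--         if lp in triggerWords:
--             tw += 1
--     return tw
-- ===== SOURCE B (Python) =====
-- def triggerWords(landingPage):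
--     triggers = {'book', 'call', 'today', 'get', 'my', 'free', 'copy', 'checklist',
--                 'pdf', 'report', 'ebook', 'join', 'session', 'now', 'set', 'email',
--                 'free', 'list', 'attend', 'start', 'access', 'training', 'speak',
--                 'expert', 'here', 'send', 'strategy', 'course', 'quote', 'newsletter'}
--     counts = {}
--     for w in landingPage.split(' '):
--         counts[w] = counts.get(w, 0) + 1
--     return sum(counts.get(t, 0) for t in triggers)
-- ===== Notes on version B (the rewrite author's own statement) =====
-- stated objective: alternative
-- what changed: A scans each page word and tests membership in the trigger list; B builds a word-frequency dictionary of the page in one pass and then sums the frequencies of the deduplicated trigger vocabulary, so the trigger set is iterated instead of tested against.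
import Mathlib
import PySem

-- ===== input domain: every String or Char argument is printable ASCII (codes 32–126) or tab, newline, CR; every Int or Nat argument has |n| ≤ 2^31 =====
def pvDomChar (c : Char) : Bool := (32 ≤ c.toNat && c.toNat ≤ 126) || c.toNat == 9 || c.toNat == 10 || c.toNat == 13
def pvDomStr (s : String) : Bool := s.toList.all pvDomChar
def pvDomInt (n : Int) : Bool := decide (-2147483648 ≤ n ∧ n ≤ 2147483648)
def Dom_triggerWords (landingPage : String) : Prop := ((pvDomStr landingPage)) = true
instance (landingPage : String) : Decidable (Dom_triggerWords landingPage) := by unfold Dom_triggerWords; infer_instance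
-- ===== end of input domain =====

-- B replaces A's per-word scan of the trigger list with a word-frequency dict summed over the deduplicated trigger set (alternative decomposition, same cost).


-- ===== PORT A =====
-- the literal trigger list from A (note 'free' appears twice, as in the source)
def trigList : List String :=
  ["book", "call", "today", "get", "my", "free", "copy", "checklist",
   "pdf", "report", "ebook", "join", "session", "now", "set", "email",
   "free", "list", "attend", "start", "access", "training", "speak",
   "expert", "here", "send", "strategy", "course", "quote", "newsletter"]

-- A: for lp in landingPage.split(' '): if lp in triggerWords: tw += 1
-- split(' ') has a non-empty separator, so Python never raises: split? is always `some` here.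
def triggerWords (landingPage : String) : Int :=
  ((PySem.Str.split? landingPage " ").getD []).foldl
    (fun tw lp => if lp ∈ trigList then tw + 1 else tw) 0

-- ===== PORT B =====
-- B's set literal (deduplicated in insertion order, as Python Source B's membership set behaves as a set)
def trigSet : PySem.Set String := PySem.Set.ofList trigList

-- B: build a frequency dict of the page's words, then sum the counts of the trigger vocabulary.
def triggerWords_alt (landingPage : String) : Int :=
  let counts : PySem.Dict String Int :=
    ((PySem.Str.split? landingPage " ").getD []).foldl
      (fun d w => d.modify w 0 (· + 1)) PySem.Dict.empty
  (trigSet.map (fun t => counts.getD t 0)).sum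

-- ===== PRECONDITION & SPEC =====
def Spec_triggerWords (landingPage : String) (out : Int) : Prop := out = triggerWords_alt landingPage
instance (landingPage : String) (out : Int) : Decidable (Spec_triggerWords landingPage out) := by unfold Spec_triggerWords; infer_instance

-- ===== CLAIM (what is proved, stated in full; the proofs are below) =====
def Claim_equal_triggerWords : Prop := ∀ (landingPage : String), Dom_triggerWords landingPage → Spec_triggerWords landingPage (triggerWords landingPage)

-- ===== LEMMAS AND PROOFS =====

-- On a duplicate-free list S, summing each element's multiplicity in ws counts the ws-elements lying in S.
theorem sum_counts_eq_countP (S : List String) (hS : S.Nodup) (ws : List String) :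
    (S.map (fun t => (ws.count t : Int))).sum = (ws.countP (· ∈ S) : Int) := by
  induction ws with
  | nil => simp
  | cons w ws ih =>
    have h1 : (S.map (fun t => ((w :: ws).count t : Int))).sum
        = (S.map (fun t => (ws.count t : Int))).sum
          + (S.map (fun t => if w == t then (1 : Int) else 0)).sum := by
      rw [← PySem.List.sum_map_add_int]
      congr 1
      apply List.map_congr_left
      intro t _
      by_cases h : w = t <;> simp [h]
    have h2 : (S.map (fun t => if w == t then (1 : Int) else 0)).sum
        = if w ∈ S then (1 : Int) else 0 := by
      rw [PySem.List.sum_map_ite_one_zero (fun t => w == t) S]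
      have : S.countP (fun t => w == t) = S.count w := by
        simp [List.count, BEq.comm]
      rw [this]
      by_cases h : w ∈ S
      · rw [List.count_eq_one_of_mem hS h]; simp [h]
      · rw [List.count_eq_zero_of_not_mem h]; simp [h]
    rw [h1, ih, h2, List.countP_cons]
    by_cases h : w ∈ S <;> simp [h]

-- core equality on the split word list, relating A's counting loop to B's counter-dict sum
theorem core_eq (ws : List String) :
    ws.foldl (fun tw lp => if lp ∈ trigList then tw + 1 else tw) (0 : Int)
      = (trigSet.map (fun t =>
          ((ws.foldl (fun d w => d.modify w (0 : Int) (· + 1)) PySem.Dict.empty).getD t 0))).sum := by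
  have hA : ws.foldl (fun tw lp => if lp ∈ trigList then tw + 1 else tw) (0 : Int)
      = (ws.countP (· ∈ trigList) : Int) := by
    simpa using PySem.List.foldl_count_if (fun lp => decide (lp ∈ trigList)) ws 0
  have hB : (trigSet.map (fun t =>
        ((ws.foldl (fun d w => d.modify w (0 : Int) (· + 1)) PySem.Dict.empty).getD t 0))).sum
      = (trigSet.map (fun t => (ws.count t : Int))).sum := by
    rw [← PySem.Dict.counter_eq_foldl ws]
    congr 1
    apply List.map_congr_left
    intro t _
    exact PySem.Dict.getD_counter ws t
  have hC : ws.countP (· ∈ trigSet) = ws.countP (· ∈ trigList) := by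
    apply List.countP_congr
    intro x _
    simp [trigSet, PySem.Set.mem_ofList]
  rw [hB, sum_counts_eq_countP trigSet (PySem.Set.nodup_ofList trigList) ws, hC, hA]

-- ===== VERDICT (by name: the statement is the Claim_ definition above) =====
theorem triggerWords_spec : Claim_equal_triggerWords := by
  intro landingPage _
  simp only [Spec_triggerWords, triggerWords, triggerWords_alt]
  exact core_eq _
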